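-- pv_equiv track=rewrite | github.com/Peter-Win/WidePreprocessor | src1/Wpp/WppLocalType.py | splitComma
-- ===== SOURCE A (Python) =====
-- def splitComma(chunks):
-- 	groups = [[]]
-- 	part = 0
-- 	for word in chunks:
-- 		if word[-1] != ',':
-- 			groups[part].append(word)
-- 		else:
-- 			if word != ',':
-- 				groups[part].append(word[0:-1])
-- 			part += 1
-- 			groups.append([])
-- 	return groups
-- ===== SOURCE B (Python) =====
-- def splitComma(chunks):
-- 	boundaries = [(i, w) for i, w in enumerate(chunks) if w[-1] == ',']
-- 	groups = []
-- 	prev = 0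
-- 	for i, w in boundaries:
-- 		group = list(chunks[prev:i])
-- 		if w != ',':
-- 			group.append(w[0:-1])
-- 		groups.append(group)
-- 		prev = i + 1
-- 	groups.append(list(chunks[prev:]))
-- 	return groups
-- ===== Notes on version B (the rewrite author's own statement) =====
-- stated objective: alternative
-- what changed: B first collects the comma-terminated boundary words with one comprehension over enumerate, then builds each group by slicing chunks between consecutive boundaries, instead of A's word-by-word accumulation into a mutable groups/part state.
import Mathlib
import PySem

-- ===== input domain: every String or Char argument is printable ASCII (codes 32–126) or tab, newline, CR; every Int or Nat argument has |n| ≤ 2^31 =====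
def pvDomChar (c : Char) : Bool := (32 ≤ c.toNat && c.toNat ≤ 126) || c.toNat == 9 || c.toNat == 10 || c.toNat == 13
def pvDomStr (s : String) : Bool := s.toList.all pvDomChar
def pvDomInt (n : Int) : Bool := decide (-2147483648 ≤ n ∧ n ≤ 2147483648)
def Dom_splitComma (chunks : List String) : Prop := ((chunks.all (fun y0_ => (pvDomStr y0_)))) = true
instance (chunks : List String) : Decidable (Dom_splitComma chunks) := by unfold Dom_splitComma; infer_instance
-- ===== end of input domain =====

-- B collects the comma-terminated boundary words first, then slices chunks between
-- consecutive boundaries, instead of A's word-by-word accumulation (objective: alternative).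


-- ===== PORT A =====
-- one loop iteration: state is (groups, part); groups[part].append(x) is List.modify
def splitCommaStep (st : List (List String) × Nat) (word : String) : List (List String) × Nat :=
  if PySem.Str.pyGet? word (-1) ≠ some ',' then
    (st.1.modify st.2 (fun g => g ++ [word]), st.2)
  else
    let groups1 := if word ≠ "," then st.1.modify st.2 (fun g => g ++ [PySem.Str.slice word (some 0) (some (-1))]) else st.1
    (groups1 ++ [[]], st.2 + 1)

def splitComma (chunks : List String) : List (List String) :=
  (chunks.foldl splitCommaStep ([[]], 0)).1

-- ===== PORT B =====
-- the `for (i, w) in boundaries` loop; `prev` is the cursor, groups are produced in order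
def splitCommaGo (chunks : List String) (bs : List (Int × String)) (prev : Int) : List (List String) :=
  match bs with
  | [] => [PySem.List.slice chunks (some prev) none]
  | (i, w) :: rest =>
      let group := PySem.List.slice chunks (some prev) (some i)
      let group := if w ≠ "," then group ++ [PySem.Str.slice w (some 0) (some (-1))] else group
      group :: splitCommaGo chunks rest (i + 1)

def splitComma_alt (chunks : List String) : List (List String) :=
  let boundaries := (PySem.List.enumerate chunks 0).filter (fun p => PySem.Str.pyGet? p.2 (-1) == some ',')
  splitCommaGo chunks boundaries 0

-- ===== PRECONDITION & SPEC =====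
-- Pre_ excludes lists containing an empty-string word, on which A raises IndexError at word[-1]
def Pre_splitComma (chunks : List String) : Prop := ∀ w ∈ chunks, w ≠ ""
instance (chunks : List String) : Decidable (Pre_splitComma chunks) := by unfold Pre_splitComma; infer_instance
def pvWitness_splitComma : List String := ["ab,", "c", ",", "d"]

def Spec_splitComma (chunks : List String) (out : List (List String)) : Prop := out = splitComma_alt chunks
instance (chunks : List String) (out : List (List String)) : Decidable (Spec_splitComma chunks out) := by unfold Spec_splitComma; infer_instance

-- ===== CLAIM (what is proved, stated in full; the proofs are below) =====
def Claim_equal_splitComma : Prop := ∀ (chunks : List String), Dom_splitComma chunks → Pre_splitComma chunks → Spec_splitComma chunks (splitComma chunks)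

-- ===== LEMMAS AND PROOFS =====

-- common reference shape: the groups of a word list, built structurally from the left
def gSpec : List String → List (List String)
  | [] => [[]]
  | w :: ws =>
    if PySem.Str.pyGet? w (-1) ≠ some ',' then
      match gSpec ws with
      | [] => [[w]]
      | h :: t => (w :: h) :: t
    else
      (if w ≠ "," then [PySem.Str.slice w (some 0) (some (-1))] else []) :: gSpec ws

lemma gSpec_ne_nil (ws : List String) : gSpec ws ≠ [] := by
  cases ws with
  | nil => simp [gSpec]
  | cons w ws =>
    simp only [gSpec]
    split
    · cases h : gSpec ws <;> simp
    · simp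

-- prepend cur onto the first group (combine with A's open current group)
def combineCur (cur : List String) : List (List String) → List (List String)
  | [] => [cur]
  | h :: t => (cur ++ h) :: t

lemma modify_append_singleton (pre : List (List String)) (cur : List String) (f : List String → List String) :
    (pre ++ [cur]).modify pre.length f = pre ++ [f cur] := by
  induction pre with
  | nil => simp [List.modify]
  | cons p ps ih => simpa [List.modify] using ih

lemma aLoop (ws : List String) : ∀ (pre : List (List String)) (cur : List String),
    (ws.foldl splitCommaStep (pre ++ [cur], pre.length)).1 = pre ++ combineCur cur (gSpec ws) := by
  induction ws with
  | nil => intro pre cur; simp [gSpec, combineCur]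
  | cons w ws ih =>
    intro pre cur
    simp only [List.foldl_cons, splitCommaStep]
    by_cases hc : PySem.Str.pyGet? w (-1) ≠ some ','
    · rw [if_pos hc]
      simp only [modify_append_singleton]
      rw [ih pre (cur ++ [w])]
      simp only [gSpec, if_pos hc]
      cases h : gSpec ws with
      | nil => exact absurd h (gSpec_ne_nil ws)
      | cons gh gt => simp [combineCur]
    · rw [if_neg hc]
      by_cases hw : w ≠ ","
      · rw [if_pos hw]
        simp only [modify_append_singleton]
        have := ih (pre ++ [cur ++ [PySem.Str.slice w (some 0) (some (-1))]]) []
        simp only [List.append_assoc, List.length_append, List.length_cons, List.length_nil] at this ⊢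
        rw [this]
        simp only [gSpec, if_neg hc, if_pos hw]
        cases h : gSpec ws with
        | nil => exact absurd h (gSpec_ne_nil ws)
        | cons gh gt => simp [combineCur]
      · rw [if_neg hw]
        have := ih (pre ++ [cur]) []
        simp only [List.append_assoc, List.length_append, List.length_cons, List.length_nil] at this ⊢
        rw [this]
        simp only [gSpec, if_neg hc, if_neg hw]
        cases h : gSpec ws with
        | nil => exact absurd h (gSpec_ne_nil ws)
        | cons gh gt => simp [combineCur]

lemma splitComma_eq_gSpec (chunks : List String) : splitComma chunks = gSpec chunks := by
  have := aLoop chunks [] []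
  simp only [List.nil_append, List.length_nil] at this
  rw [splitComma, this]
  cases h : gSpec chunks with
  | nil => exact absurd h (gSpec_ne_nil chunks)
  | cons gh gt => simp [combineCur]

-- B side
def filterB (l : List (Int × String)) : List (Int × String) :=
  l.filter (fun p => PySem.Str.pyGet? p.2 (-1) == some ',')

lemma filterB_index_shape (ws : List String) (m : Nat) (p : Int × String)
    (hp : p ∈ filterB (PySem.List.enumerate ws (m : Int))) : ∃ k : Nat, p.1 = ((m + k : Nat) : Int) := by
  have hm : p ∈ PySem.List.enumerate ws (m : Int) := List.mem_filter.mp hp |>.1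
  rw [PySem.List.mem_enumerate_iff] at hm
  obtain ⟨k, hk, rfl⟩ := hm
  exact ⟨k, by push_cast; ring⟩

-- prepend the first group of a bGo result
def prependFirst (w : String) : List (List String) → List (List String)
  | [] => [[w]]
  | h :: t => (w :: h) :: t

lemma bPrep (pre ws' : List String) (w : String) (bs : List (Int × String))
    (hbs : ∀ p ∈ bs, ∃ k : Nat, p.1 = ((pre.length + 1 + k : Nat) : Int)) :
    splitCommaGo (pre ++ w :: ws') bs ((pre.length : Nat) : Int)
      = prependFirst w (splitCommaGo (pre ++ w :: ws') bs (((pre.length : Nat) : Int) + 1)) := by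
  cases bs with
  | nil =>
    simp only [splitCommaGo, prependFirst]
    have h1 : ((pre.length : Nat) : Int) + 1 = (((pre.length + 1 : Nat)) : Int) := by push_cast; ring
    rw [h1, PySem.List.slice_from_natCast, PySem.List.slice_from_natCast]
    simp
  | cons p rest =>
    obtain ⟨i, u⟩ := p
    obtain ⟨k, hk⟩ := hbs (i, u) (List.mem_cons_self ..)
    simp only at hk
    subst hk
    simp only [splitCommaGo, prependFirst]
    have h1 : ((pre.length : Nat) : Int) + 1 = (((pre.length + 1 : Nat)) : Int) := by push_cast; ring
    rw [h1, PySem.List.slice_natCast, PySem.List.slice_natCast]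
    have hd : (pre ++ w :: ws').drop pre.length = w :: ws' := by
      simp
    have hd1 : (pre ++ w :: ws').drop (pre.length + 1) = ws' := by
      rw [show pre.length + 1 = (pre ++ [w]).length by simp, show pre ++ w :: ws' = (pre ++ [w]) ++ ws' by simp]
      exact List.drop_left
    rw [hd, hd1]
    have ht : pre.length + 1 + k - pre.length = k + 1 := by omega
    have ht1 : pre.length + 1 + k - (pre.length + 1) = k := by omega
    rw [ht, ht1]
    simp only [List.take_succ_cons]
    split <;> simp

lemma bKey (ws : List String) : ∀ (pre : List String),
    splitCommaGo (pre ++ ws) (filterB (PySem.List.enumerate ws ((pre.length : Nat) : Int))) ((pre.length : Nat) : Int)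
      = gSpec ws := by
  induction ws with
  | nil =>
    intro pre
    simp only [PySem.List.enumerate_nil, filterB, List.filter_nil, splitCommaGo,
      PySem.List.slice_from_natCast, gSpec]
    simp
  | cons w ws ih =>
    intro pre
    rw [PySem.List.enumerate_cons]
    have hcast : ((pre.length : Nat) : Int) + 1 = (((pre.length + 1 : Nat)) : Int) := by push_cast; ring
    have hsplit : pre ++ w :: ws = (pre ++ [w]) ++ ws := by simp
    have hlen : pre.length + 1 = (pre ++ [w]).length := by simp
    by_cases hc : PySem.Str.pyGet? w (-1) = some ','
    · have hc' : PySem.List.pyGet? w.toList (-1) = some ',' := by simpa using hc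
      have hf : filterB (((((pre.length : Nat) : Int)), w) :: PySem.List.enumerate ws (((pre.length : Nat) : Int) + 1))
        = ((((pre.length : Nat) : Int)), w) :: filterB (PySem.List.enumerate ws (((pre.length : Nat) : Int) + 1)) := by
        simp [filterB, hc']
      rw [hf]
      simp only [splitCommaGo, PySem.List.slice_natCast]
      have hmain : splitCommaGo (pre ++ w :: ws)
          (filterB (PySem.List.enumerate ws (((pre.length : Nat) : Int) + 1))) (((pre.length : Nat) : Int) + 1)
          = gSpec ws := by
        rw [hcast, hsplit, hlen]
        exact ih (pre ++ [w])
      rw [hmain]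
      simp only [gSpec, hc]
      split <;> simp
    · have hc' : ¬ PySem.List.pyGet? w.toList (-1) = some ',' := by simpa using hc
      have hf : filterB (((((pre.length : Nat) : Int)), w) :: PySem.List.enumerate ws (((pre.length : Nat) : Int) + 1))
        = filterB (PySem.List.enumerate ws (((pre.length : Nat) : Int) + 1)) := by
        simp [filterB, hc']
      rw [hf]
      have hbs : ∀ p ∈ filterB (PySem.List.enumerate ws (((pre.length : Nat) : Int) + 1)),
          ∃ k : Nat, p.1 = ((pre.length + 1 + k : Nat) : Int) := by
        intro p hp
        rw [hcast] at hp
        exact filterB_index_shape ws (pre.length + 1) p hp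
      rw [bPrep pre ws w _ hbs]
      have hmain : splitCommaGo (pre ++ w :: ws)
          (filterB (PySem.List.enumerate ws (((pre.length : Nat) : Int) + 1))) (((pre.length : Nat) : Int) + 1)
          = gSpec ws := by
        rw [hcast, hsplit, hlen]
        exact ih (pre ++ [w])
      rw [hmain]
      simp only [gSpec]
      cases h : gSpec ws <;> simp [prependFirst, hc']

lemma splitComma_alt_eq_gSpec (chunks : List String) : splitComma_alt chunks = gSpec chunks := by
  have := bKey chunks []
  simpa [splitComma_alt, filterB] using this

-- ===== VERDICT (by name: the statement is the Claim_ definition above) =====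
theorem splitComma_spec : Claim_equal_splitComma := by
  intro chunks _ _
  unfold Spec_splitComma
  rw [splitComma_eq_gSpec, splitComma_alt_eq_gSpec]
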